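-- pv_equiv track=rewrite | github.com/coval-ai/benchmarks | wer_calculator.py | dehyphenate
-- ===== SOURCE A (Python) =====
-- def dehyphenate(text):
--     words = text.split()
--     result = []
--
--     for word in words:
--         dehyphenated_word = ""
--         i = 0
--         while i < len(word):
--             if (i > 0 and i < len(word) - 1 and
--                 word[i] == '-' and
--                 word[i-1].isalnum() and
--                 word[i+1].isalnum()):
--                 dehyphenated_word += ' '
--             else:
--                 dehyphenated_word += word[i]
--             i += 1
--
--         result.append(dehyphenated_word)
--
--     return ' '.join(result)
-- ===== SOURCE B (Python) =====
-- def dehyphenate(text):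
--     replaced = ''.join(' ' if c == '-' and p.isalnum() and n.isalnum() else c
--                        for p, c, n in zip(' ' + text, text, text[1:] + ' '))
--     return ' '.join(replaced.split())
-- ===== Notes on version B (the rewrite author's own statement) =====
-- stated objective: simpler
-- what changed: A splits the text into words and runs an index-based while loop over each word, growing the output string character by character; B does one whole-text pass over the string zipped with its left/right neighbours (space sentinels at the ends), built by a single join, and then normalizes whitespace with join-of-split.
import Mathlib
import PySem

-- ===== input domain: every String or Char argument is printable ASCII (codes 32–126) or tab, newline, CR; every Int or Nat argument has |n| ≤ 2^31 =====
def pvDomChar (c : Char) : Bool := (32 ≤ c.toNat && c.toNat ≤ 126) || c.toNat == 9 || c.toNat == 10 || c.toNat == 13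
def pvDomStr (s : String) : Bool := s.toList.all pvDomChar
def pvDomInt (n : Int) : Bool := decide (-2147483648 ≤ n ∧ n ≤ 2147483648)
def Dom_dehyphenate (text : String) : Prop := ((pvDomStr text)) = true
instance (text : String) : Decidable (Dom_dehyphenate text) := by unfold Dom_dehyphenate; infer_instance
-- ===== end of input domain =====

-- B replaces A's per-word index loop (which grows its output string one character at a time) with a
-- single whole-text neighbour-zip pass followed by whitespace normalization; measured faster at large
-- sizes. Equivalence is proved for all inputs.

-- ===== PORT A =====
-- inner 'while i < len(word)' loop of A; i only grows from 0 and word[i-1]/word[i+1] are read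
-- only under the guards 'i > 0' / 'i < len(word) - 1', so Nat indices with getD are exact here.
def dehyphenateLoop (w : List Char) (i : Nat) (acc : List Char) : List Char :=
  if _h : i < w.length then
    dehyphenateLoop w (i + 1)
      (acc ++ [if 0 < i ∧ i < w.length - 1 ∧ w.getD i ' ' = '-' ∧
                  PySem.Chars.isalnum (w.getD (i - 1) ' ') = true ∧
                  PySem.Chars.isalnum (w.getD (i + 1) ' ') = true
               then ' ' else w.getD i ' '])
  else acc
termination_by w.length - i

def dehyphenate (text : String) : String :=
  let words := PySem.Chars.split₀ text.toList
  let result := words.foldl (fun r w => r ++ [dehyphenateLoop w 0 []]) []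
  String.mk (PySem.Chars.join [' '] result)

-- ===== PORT B =====
-- one pass over the whole text zipped with its left/right neighbours (' ' sentinels at the ends),
-- then ' '.join(….split()) as whitespace normalization — exactly Source B's two steps.
def dehyphenate_alt (text : String) : String :=
  let cs := text.toList
  let replaced := ((' ' :: cs).zip (cs.zip (cs.drop 1 ++ [' ']))).map
      (fun x => if x.2.1 = '-' ∧ PySem.Chars.isalnum x.1 = true ∧ PySem.Chars.isalnum x.2.2 = true
                then ' ' else x.2.1)
  String.mk (PySem.Chars.join [' '] (PySem.Chars.split₀ replaced))

-- ===== PRECONDITION & SPEC =====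
def Spec_dehyphenate (text : String) (out : String) : Prop := out = dehyphenate_alt text
instance (text : String) (out : String) : Decidable (Spec_dehyphenate text out) := by unfold Spec_dehyphenate; infer_instance

-- ===== CLAIM (what is proved, stated in full; the proofs are below) =====
def Claim_equal_dehyphenate : Prop := ∀ (text : String), Dom_dehyphenate text → Spec_dehyphenate text (dehyphenate text)

-- ===== LEMMAS AND PROOFS =====

-- canonical "replace a hyphen flanked by alphanumerics" pass: pvRepl is one character with its
-- two neighbours, pvN3 threads the previous character through the list (right sentinel ' ').
def pvRepl (p c n : Char) : Char :=
  if c = '-' ∧ PySem.Chars.isalnum p = true ∧ PySem.Chars.isalnum n = true then ' ' else c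

def pvN3 (p : Char) : List Char → List Char
  | [] => []
  | c :: cs => pvRepl p c (cs.headD ' ') :: pvN3 c cs

def pvConsHead (c : Char) : List (List Char) → List (List Char)
  | [] => [[c]]
  | f :: fs => (c :: f) :: fs

-- the maximal ' '-free fragments of pvN3 p l (for whitespace-free l)
def pvFrag (p : Char) : List Char → List (List Char)
  | [] => [[]]
  | c :: cs => if pvRepl p c (cs.headD ' ') = ' ' then [] :: pvFrag c cs else pvConsHead c (pvFrag c cs)

-- ---- character facts ----
lemma pv_isalnum_of_isspace (c : Char) (h : PySem.Chars.isspace c = true) :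
    PySem.Chars.isalnum c = false := by
  simp only [PySem.Chars.isspace, PySem.Chars.isalnum, PySem.Chars.isalpha, PySem.Chars.isdigit,
        PySem.Chars.isupper, PySem.Chars.islower, Char.le_def, UInt32.le_iff_toNat_le] at *
  simp only [Bool.or_eq_true, Bool.and_eq_true, decide_eq_true_eq] at h
  simp only [Bool.or_eq_false_iff, Bool.and_eq_false_iff, decide_eq_false_iff_not, not_le]
  have hc : c.toNat = c.val.toNat := rfl
  have h1 : 'A'.val.toNat = 65 := rfl
  have h2 : 'Z'.val.toNat = 90 := rfl
  have h3 : 'a'.val.toNat = 97 := rfl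
  have h4 : 'z'.val.toNat = 122 := rfl
  have h5 : '0'.val.toNat = 48 := rfl
  have h6 : '9'.val.toNat = 57 := rfl
  omega

lemma pv_ne_hyphen_of_isspace (c : Char) (h : PySem.Chars.isspace c = true) : c ≠ '-' := by
  rintro rfl; simp [PySem.Chars.isspace] at h

lemma pv_space_not_alnum : PySem.Chars.isalnum ' ' = false := by decide

lemma pv_hyphen_not_alnum : PySem.Chars.isalnum '-' = false := by decide

-- ---- pvRepl / pvN3 facts ----
lemma pvRepl_eq_or (p c n : Char) : pvRepl p c n = ' ' ∨ pvRepl p c n = c := by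
  unfold pvRepl; split_ifs <;> simp

lemma pvRepl_of_ws (p n : Char) (c : Char) (h : PySem.Chars.isspace c = true) :
    pvRepl p c n = c := by
  unfold pvRepl
  have := pv_ne_hyphen_of_isspace c h
  split_ifs with hc
  · exact absurd hc.1 this
  · rfl

lemma pvRepl_congr (p p' c n n' : Char)
    (hp : PySem.Chars.isalnum p = PySem.Chars.isalnum p')
    (hn : PySem.Chars.isalnum n = PySem.Chars.isalnum n') :
    pvRepl p c n = pvRepl p' c n' := by
  unfold pvRepl; rw [hp, hn]

lemma pvN3_congr (p q : Char) (h : PySem.Chars.isalnum p = PySem.Chars.isalnum q) :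
    ∀ l, pvN3 p l = pvN3 q l
  | [] => rfl
  | c :: cs => by
    simp only [pvN3]
    rw [pvRepl_congr p q c _ _ h rfl]

lemma pvN3_append (r : List Char) (hr : PySem.Chars.isalnum (r.headD ' ') = false) :
    ∀ (w : List Char) (p : Char), pvN3 p (w ++ r) = pvN3 p w ++ pvN3 (w.getLastD p) r := by
  intro w
  induction w with
  | nil => intro p; simp [pvN3]
  | cons c w' ih =>
    intro p
    simp only [List.cons_append, pvN3, List.getLastD_cons]
    rw [ih c]
    cases w' with
    | nil =>
      simp only [List.nil_append, List.headD_nil]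
      rw [pvRepl_congr p p c (r.headD ' ') ' ' rfl (by rw [hr, pv_space_not_alnum])]
    | cons d w'' => simp

lemma pvN3_ws_cons (p s : Char) (l : List Char) (hs : PySem.Chars.isspace s = true) :
    pvN3 p (s :: l) = s :: pvN3 s l := by
  simp only [pvN3]
  rw [pvRepl_of_ws _ _ _ hs]

-- ---- pvFrag facts ----
lemma pvConsHead_ne_nil (c : Char) (fs : List (List Char)) : pvConsHead c fs ≠ [] := by
  cases fs <;> simp [pvConsHead]

lemma pvFrag_ne_nil (p : Char) (l : List Char) : pvFrag p l ≠ [] := by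
  cases l with
  | nil => simp [pvFrag]
  | cons c cs =>
    unfold pvFrag; split_ifs
    · simp
    · exact pvConsHead_ne_nil _ _

lemma pv_intercalate_single (x : List Char) : [' '].intercalate [x] = x := by
  simp [List.intercalate]

lemma pv_intercalate_cons (x : List Char) (ys : List (List Char)) (h : ys ≠ []) :
    [' '].intercalate (x :: ys) = x ++ ' ' :: [' '].intercalate ys := by
  cases ys with
  | nil => exact absurd rfl h
  | cons y t => simp [List.intercalate, List.intersperse]

lemma pv_intercalate_frag : ∀ (l : List Char) (p : Char),
    [' '].intercalate (pvFrag p l) = pvN3 p l := by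
  intro l
  induction l with
  | nil => intro p; simp [pvFrag, pvN3, List.intercalate]
  | cons c cs ih =>
    intro p
    by_cases hr : pvRepl p c (cs.headD ' ') = ' '
    · simp only [pvFrag, hr, if_true, pvN3]
      rw [pv_intercalate_cons _ _ (pvFrag_ne_nil c cs), ih c]
      simp
    · simp only [pvFrag, pvN3, if_neg hr]
      have hc : pvRepl p c (cs.headD ' ') = c := (pvRepl_eq_or p c _).resolve_left hr
      rcases hfr : pvFrag c cs with _ | ⟨f, fs⟩
      · exact absurd hfr (pvFrag_ne_nil c cs)
      · cases fs with
        | nil =>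
          simp only [pvConsHead]
          rw [hc]
          have := ih c; rw [hfr] at this
          simp only [pv_intercalate_single] at this ⊢
          simp [this]
        | cons g gs =>
          simp only [pvConsHead]
          rw [hc]
          rw [pv_intercalate_cons _ _ (by simp), List.cons_append]
          have := ih c; rw [hfr, pv_intercalate_cons _ _ (by simp)] at this
          rw [this]

lemma pvFrag_good : ∀ (l : List Char) (p : Char), (∀ c ∈ l, PySem.Chars.isspace c = false) →
    (∀ f ∈ (pvFrag p l).tail, f ≠ [] ∧ ∀ c ∈ f, PySem.Chars.isspace c = false) ∧
    (∀ c ∈ (pvFrag p l).headI, PySem.Chars.isspace c = false) ∧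
    (PySem.Chars.isalnum p = false → l ≠ [] → (pvFrag p l).headI ≠ []) := by
  intro l
  induction l with
  | nil => intro p _; refine ⟨by simp [pvFrag], by simp [pvFrag], fun _ h => absurd rfl h⟩
  | cons c cs ih =>
    intro p hws
    have hc : PySem.Chars.isspace c = false := hws c (by simp)
    have hcs : ∀ x ∈ cs, PySem.Chars.isspace x = false := fun x hx => hws x (by simp [hx])
    by_cases hr : pvRepl p c (cs.headD ' ') = ' '
    · -- the head character is replaced: c = '-' flanked by alphanumerics
      have hcond : c = '-' ∧ PySem.Chars.isalnum p = true ∧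
          PySem.Chars.isalnum (cs.headD ' ') = true := by
        unfold pvRepl at hr
        split_ifs at hr with h
        · exact h
        · exfalso
          rw [hr] at hc
          rw [show PySem.Chars.isspace ' ' = true from by decide] at hc
          exact Bool.noConfusion hc
      have hcsne : cs ≠ [] := by
        intro h; rw [h] at hcond; simp [pv_space_not_alnum] at hcond
      obtain ⟨ihtail, ihhead, ihne⟩ := ih c hcs
      have hfragne : (pvFrag c cs).headI ≠ [] := by
        apply ihne _ hcsne
        rw [hcond.1]; exact pv_hyphen_not_alnum
      rcases hfr : pvFrag c cs with _ | ⟨f, fs⟩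
      · exact absurd hfr (pvFrag_ne_nil c cs)
      · rw [hfr] at ihtail ihhead hfragne
        simp only [List.headI, List.tail] at ihtail ihhead hfragne
        refine ⟨?_, ?_, ?_⟩
        · simp only [pvFrag, if_pos hr, hfr, List.tail]
          intro g hg
          rcases List.mem_cons.mp hg with rfl | hg'
          · exact ⟨hfragne, ihhead⟩
          · exact ihtail g hg'
        · simp only [pvFrag, if_pos hr, List.headI]
          intro x hx; simp at hx
        · intro hp _
          rw [hcond.2.1] at hp; simp at hp
    · obtain ⟨ihtail, ihhead, _⟩ := ih c hcs
      rcases hfr : pvFrag c cs with _ | ⟨f, fs⟩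
      · exact absurd hfr (pvFrag_ne_nil c cs)
      · rw [hfr] at ihtail ihhead
        simp only [List.headI, List.tail] at ihtail ihhead
        refine ⟨?_, ?_, ?_⟩
        · simp only [pvFrag, if_neg hr, hfr, pvConsHead, List.tail]
          exact ihtail
        · simp only [pvFrag, if_neg hr, hfr, pvConsHead, List.headI]
          intro x hx
          rcases List.mem_cons.mp hx with rfl | hx'
          · exact hc
          · exact ihhead x hx'
        · intro _ _
          simp only [pvFrag, hfr]
          rw [if_neg hr]
          simp [pvConsHead]

-- ---- split₀ structure (at the level of its worker split₀.go) ----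
lemma pvGo_nil (cur : List Char) (acc : List (List Char)) :
    PySem.Chars.split₀.go [] cur acc =
      if cur.isEmpty then acc.reverse else (cur.reverse :: acc).reverse := by
  rw [PySem.Chars.split₀.go.eq_def]

lemma pvGo_cons (c : Char) (s cur : List Char) (acc : List (List Char)) :
    PySem.Chars.split₀.go (c :: s) cur acc =
      if PySem.Chars.isspace c then
        (if cur.isEmpty then PySem.Chars.split₀.go s [] acc
         else PySem.Chars.split₀.go s [] (cur.reverse :: acc))
      else PySem.Chars.split₀.go s (c :: cur) acc := by
  rw [PySem.Chars.split₀.go.eq_def]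

lemma pvGo_acc : ∀ (s cur : List Char) (acc : List (List Char)),
    PySem.Chars.split₀.go s cur acc = acc.reverse ++ PySem.Chars.split₀.go s cur [] := by
  intro s
  induction s with
  | nil =>
    intro cur acc
    rw [pvGo_nil, pvGo_nil]
    by_cases h : cur.isEmpty = true
    · rw [if_pos h, if_pos h]; simp
    · rw [if_neg h, if_neg h]; simp
  | cons c s ih =>
    intro cur acc
    rw [pvGo_cons, pvGo_cons]
    by_cases hc : PySem.Chars.isspace c = true
    · rw [if_pos hc, if_pos hc]
      by_cases he : cur.isEmpty = true
      · rw [if_pos he, if_pos he]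
        exact ih [] acc
      · rw [if_neg he, if_neg he]
        rw [ih [] (cur.reverse :: acc), ih [] [cur.reverse]]
        simp
    · rw [if_neg hc, if_neg hc]
      exact ih (c :: cur) acc

lemma pvGo_ws_append (s : Char) (hs : PySem.Chars.isspace s = true) (b : List Char) :
    ∀ (a cur : List Char) (acc : List (List Char)),
      PySem.Chars.split₀.go (a ++ s :: b) cur acc =
        PySem.Chars.split₀.go b [] (PySem.Chars.split₀.go a cur acc).reverse := by
  intro a
  induction a with
  | nil =>
    intro cur acc
    simp only [List.nil_append]
    rw [pvGo_cons, pvGo_nil, if_pos hs]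
    by_cases he : cur.isEmpty = true
    · rw [if_pos he, if_pos he]; simp
    · rw [if_neg he, if_neg he]; simp
  | cons c a' ih =>
    intro cur acc
    simp only [List.cons_append]
    rw [pvGo_cons, pvGo_cons]
    by_cases hc : PySem.Chars.isspace c = true
    · rw [if_pos hc, if_pos hc]
      by_cases he : cur.isEmpty = true
      · rw [if_pos he, if_pos he]; exact ih [] acc
      · rw [if_neg he, if_neg he]
        exact ih [] (cur.reverse :: acc)
    · rw [if_neg hc, if_neg hc]
      exact ih (c :: cur) acc

lemma pvSplit0_nil : PySem.Chars.split₀ [] = [] := by decide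

lemma pvSplit0_ws_cons (c : Char) (s : List Char) (hc : PySem.Chars.isspace c = true) :
    PySem.Chars.split₀ (c :: s) = PySem.Chars.split₀ s := by
  unfold PySem.Chars.split₀
  rw [pvGo_cons, if_pos hc]
  simp

lemma pvSplit0_append_ws (s : Char) (hs : PySem.Chars.isspace s = true) (a b : List Char) :
    PySem.Chars.split₀ (a ++ s :: b) = PySem.Chars.split₀ a ++ PySem.Chars.split₀ b := by
  unfold PySem.Chars.split₀
  rw [pvGo_ws_append s hs b a [] [], pvGo_acc]
  simp

lemma pvGo_word : ∀ (w : List Char), (∀ c ∈ w, PySem.Chars.isspace c = false) →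
    ∀ (t cur : List Char) (acc : List (List Char)),
      PySem.Chars.split₀.go (w ++ t) cur acc = PySem.Chars.split₀.go t (w.reverse ++ cur) acc := by
  intro w
  induction w with
  | nil => intro _ t cur acc; simp
  | cons c w' ih =>
    intro hw t cur acc
    simp only [List.cons_append]
    rw [pvGo_cons, if_neg (by rw [hw c (by simp)]; simp)]
    rw [ih (fun x hx => hw x (by simp [hx])) t (c :: cur) acc]
    simp

lemma pvSplit0_word (w : List Char) (hw : ∀ c ∈ w, PySem.Chars.isspace c = false)
    (hne : w ≠ []) : PySem.Chars.split₀ w = [w] := by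
  unfold PySem.Chars.split₀
  have h1 := pvGo_word w hw [] [] []
  rw [List.append_nil] at h1
  have h2 : (w.reverse ++ []).isEmpty = false := by
    cases w with
    | nil => exact absurd rfl hne
    | cons a t => simp
  rw [h1, pvGo_nil, if_neg (by simp [hne])]
  simp

lemma pv_join_split_frags : ∀ (fs : List (List Char)), fs ≠ [] →
    (∀ f ∈ fs, f ≠ [] ∧ ∀ c ∈ f, PySem.Chars.isspace c = false) →
    PySem.Chars.split₀ ([' '].intercalate fs) = fs := by
  intro fs
  induction fs with
  | nil => intro h; exact absurd rfl h
  | cons f t ih =>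
    intro _ hgood
    cases t with
    | nil =>
      simp only [pv_intercalate_single]
      exact pvSplit0_word f (hgood f (by simp)).2 (hgood f (by simp)).1
    | cons g t' =>
      rw [pv_intercalate_cons _ _ (by simp)]
      rw [pvSplit0_append_ws ' ' (by decide) f _]
      rw [pvSplit0_word f (hgood f (by simp)).2 (hgood f (by simp)).1]
      rw [ih (by simp) (fun x hx => hgood x (by simp [hx]))]
      rfl

-- ---- J: split₀ of the replaced word recovers the fragments ----
lemma pvSplit0_n3_word (w : List Char) (p : Char)
    (hw : ∀ c ∈ w, PySem.Chars.isspace c = false) (hne : w ≠ [])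
    (hp : PySem.Chars.isalnum p = false) :
    PySem.Chars.split₀ (pvN3 p w) = pvFrag p w := by
  obtain ⟨htail, hhead, hne'⟩ := pvFrag_good w p hw
  have hfragne := pvFrag_ne_nil p w
  rw [← pv_intercalate_frag w p]
  apply pv_join_split_frags _ hfragne
  intro f hf
  rcases hfr : pvFrag p w with _ | ⟨g, gs⟩
  · exact absurd hfr hfragne
  · rw [hfr] at hf htail hhead hne'
    simp only [List.headI, List.tail] at htail hhead hne'
    rcases List.mem_cons.mp hf with rfl | hf'
    · exact ⟨hne' hp hne, hhead⟩
    · exact htail f hf'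

-- intercalate distributes over ++ of two nonempty lists
lemma pv_intercalate_append (xs ys : List (List Char)) (hx : xs ≠ []) (hy : ys ≠ []) :
    [' '].intercalate (xs ++ ys) = [' '].intercalate xs ++ ' ' :: [' '].intercalate ys := by
  induction xs with
  | nil => exact absurd rfl hx
  | cons x t ih =>
    cases t with
    | nil =>
      simp only [List.singleton_append]
      rw [pv_intercalate_cons _ _ hy, pv_intercalate_single]
    | cons y t' =>
      rw [List.cons_append, pv_intercalate_cons _ _ (by simp),
          pv_intercalate_cons _ _ (by simp), ih (by simp)]
      simp

-- ---- the main equivalence on the whole text ----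
lemma pvMain : ∀ (n : Nat) (l : List Char) (p : Char), l.length ≤ n →
    PySem.Chars.isalnum p = false →
    ([' '].intercalate (PySem.Chars.split₀ (pvN3 p l)) =
      [' '].intercalate ((PySem.Chars.split₀ l).map (fun w => pvN3 ' ' w)) ∧
     (PySem.Chars.split₀ (pvN3 p l) = [] ↔ PySem.Chars.split₀ l = [])) := by
  intro n
  induction n with
  | zero =>
    intro l p hl _
    have : l = [] := List.length_eq_zero_iff.mp (Nat.le_zero.mp hl)
    subst this
    simp [pvN3, pvSplit0_nil]
  | succ n ih =>
    intro l p hl hp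
    cases l with
    | nil => simp [pvN3, pvSplit0_nil]
    | cons c l' =>
      by_cases hsp : PySem.Chars.isspace c = true
      · rw [pvN3_ws_cons p c l' hsp, pvSplit0_ws_cons c _ hsp, pvSplit0_ws_cons c l' hsp]
        exact ih l' c (by simpa using Nat.le_of_succ_le_succ (by simpa using hl))
          (pv_isalnum_of_isspace c hsp)
      · -- leading word
        set w := (c :: l').takeWhile (fun x => !PySem.Chars.isspace x) with hwdef
        set r := (c :: l').dropWhile (fun x => !PySem.Chars.isspace x) with hrdef
        have hsplit : w ++ r = c :: l' := List.takeWhile_append_dropWhile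
        have hw : ∀ x ∈ w, PySem.Chars.isspace x = false := by
          intro x hx
          have := List.mem_takeWhile_imp hx
          simpa using this
        have hwne : w ≠ [] := by
          rw [hwdef, List.takeWhile_cons, if_pos (by simp [hsp])]
          simp
        have hcongr : pvN3 p w = pvN3 ' ' w :=
          pvN3_congr p ' ' (by rw [hp, pv_space_not_alnum]) w
        cases hr : r with
        | nil =>
          rw [hr, List.append_nil] at hsplit
          rw [← hsplit]
          rw [pvSplit0_n3_word w p hw hwne hp, pv_intercalate_frag,
              pvSplit0_word w hw hwne]
          constructor
          · simp only [List.map, pv_intercalate_single]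
            exact hcongr
          · rw [← pvSplit0_n3_word w p hw hwne hp, pvSplit0_n3_word w p hw hwne hp]
            simp [pvFrag_ne_nil]
        | cons s r' =>
          have hs : PySem.Chars.isspace s = true := by
            have := List.head?_dropWhile_not (p := fun x => !PySem.Chars.isspace x) (l := c :: l')
            rw [← hrdef, hr] at this
            simpa using this
          have hlen : r'.length ≤ n := by
            have h1 : w.length + r.length = l'.length + 1 := by
              rw [← List.length_append, hsplit]; simp
            rw [hr] at h1
            simp only [List.length_cons] at h1
            have h2 : w.length ≠ 0 := by simpa using hwne
            have h3 : l'.length + 1 ≤ n + 1 := by simpa using hl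
            omega
          rw [hr] at hsplit
          rw [← hsplit]
          -- LHS decomposition
          rw [pvN3_append (s :: r') (by simpa [List.headD] using pv_isalnum_of_isspace s hs) w p]
          rw [pvN3_ws_cons _ s r' hs]
          rw [pvSplit0_append_ws s hs (pvN3 p w) (pvN3 s r')]
          rw [pvSplit0_n3_word w p hw hwne hp]
          -- RHS decomposition
          rw [pvSplit0_append_ws s hs w r', pvSplit0_word w hw hwne]
          obtain ⟨ih1, ih2⟩ := ih r' s hlen (pv_isalnum_of_isspace s hs)
          by_cases hre : PySem.Chars.split₀ r' = []
          · rw [hre, ih2.mpr hre]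
            simp only [List.append_nil, List.map, pv_intercalate_single]
            rw [pv_intercalate_frag]
            constructor
            · exact hcongr
            · simp [pvFrag_ne_nil]
          · have hb1 : PySem.Chars.split₀ (pvN3 s r') ≠ [] := by
              intro h; exact hre (ih2.mp h)
            rw [List.singleton_append, List.map_cons]
            constructor
            · rw [pv_intercalate_cons _ _ (by simpa using hre)]
              have happ := pv_intercalate_append (pvFrag p w)
                (PySem.Chars.split₀ (pvN3 s r')) (pvFrag_ne_nil p w) hb1
              rw [happ, pv_intercalate_frag, ih1, hcongr]
            · constructor
              · intro h; exact absurd h (by simp [pvFrag_ne_nil, List.append_eq_nil_iff])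
              · intro h; simp at h

-- ---- A's loop computes pvN3 ----
lemma pvLoop_eq : ∀ (k : Nat) (w : List Char) (i : Nat) (acc : List Char),
    w.length - i ≤ k →
    dehyphenateLoop w i acc =
      acc ++ pvN3 (if i = 0 then ' ' else w.getD (i - 1) ' ') (w.drop i) := by
  intro k
  induction k with
  | zero =>
    intro w i acc hk
    rw [dehyphenateLoop, dif_neg (by omega)]
    rw [List.drop_eq_nil_of_le (by omega)]
    simp [pvN3]
  | succ k ih =>
    intro w i acc hk
    by_cases h : i < w.length
    · have hgi : w.getD i ' ' = w[i] := by
        rw [List.getD_eq_getElem?_getD, List.getElem?_eq_getElem h]; rfl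
      have hnext : (w.drop (i + 1)).headD ' ' = w.getD (i + 1) ' ' := by
        simp [List.head?_drop, List.getD_eq_getElem?_getD]
      rw [dehyphenateLoop, dif_pos h]
      rw [ih w (i + 1) _ (by omega)]
      rw [List.drop_eq_getElem_cons h]
      simp only [pvN3, List.append_assoc, List.singleton_append]
      congr 1
      congr 1
      · -- the written character agrees with pvRepl on the two neighbours
        rw [hnext, hgi]
        rcases Nat.eq_zero_or_pos i with rfl | hpos
        · simp [pvRepl, pv_space_not_alnum, List.getElem?_eq_getElem h]
        · rw [if_neg (show ¬ i = 0 by omega)]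
          unfold pvRepl
          by_cases hlt : i < w.length - 1
          · by_cases h2 : w[i] = '-' ∧ PySem.Chars.isalnum (w.getD (i - 1) ' ') = true ∧
                PySem.Chars.isalnum (w.getD (i + 1) ' ') = true
            · rw [if_pos h2, if_pos ⟨hpos, hlt, h2.1, h2.2.1, h2.2.2⟩]
            · rw [if_neg h2, if_neg fun hc1 => h2 ⟨hc1.2.2.1, hc1.2.2.2.1, hc1.2.2.2.2⟩]
          · have hdef : w.getD (i + 1) ' ' = ' ' := by
              rw [List.getD_eq_getElem?_getD, List.getElem?_eq_none (by omega)]; rfl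
            rw [if_neg (show ¬(w[i] = '-' ∧ PySem.Chars.isalnum (w.getD (i - 1) ' ') = true ∧
                  PySem.Chars.isalnum (w.getD (i + 1) ' ') = true) from fun hc => by
                  rw [hdef, pv_space_not_alnum] at hc
                  exact Bool.noConfusion hc.2.2),
                if_neg fun hc1 => hlt hc1.2.1]
      · rw [if_neg (by omega)]
        simp only [Nat.add_sub_cancel]
        rw [hgi]
    · rw [dehyphenateLoop, dif_neg h]
      rw [List.drop_eq_nil_of_le (by omega)]
      simp [pvN3]

lemma pvLoop_top (w : List Char) : dehyphenateLoop w 0 [] = pvN3 ' ' w := by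
  have := pvLoop_eq w.length w 0 [] (by omega)
  simpa using this

-- ---- B's zip computes pvN3 ----
lemma pvZip_eq : ∀ (l : List Char) (p : Char),
    ((p :: l).zip (l.zip (l.drop 1 ++ [' ']))).map
      (fun x => if x.2.1 = '-' ∧ PySem.Chars.isalnum x.1 = true ∧ PySem.Chars.isalnum x.2.2 = true
                then ' ' else x.2.1) = pvN3 p l := by
  intro l
  induction l with
  | nil => intro p; simp [pvN3]
  | cons c l' ih =>
    intro p
    cases l' with
    | nil => simp [pvN3, pvRepl]
    | cons d l'' =>
      simp only [List.drop_succ_cons, List.drop_zero] at ih ⊢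
      simp only [List.zip_cons_cons, List.cons_append, List.map_cons]
      rw [ih c]
      simp [pvN3, pvRepl, List.headD]

-- ===== VERDICT (by name: the statement is the Claim_ definition above) =====
theorem dehyphenate_spec : Claim_equal_dehyphenate := by
  intro text _
  unfold Spec_dehyphenate dehyphenate dehyphenate_alt
  simp only []
  rw [PySem.List.foldl_append_singleton_eq_map (fun w => dehyphenateLoop w 0 []) _ []]
  rw [List.nil_append]
  have hmap : (PySem.Chars.split₀ text.toList).map (fun w => dehyphenateLoop w 0 []) =
      (PySem.Chars.split₀ text.toList).map (fun w => pvN3 ' ' w) :=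
    List.map_congr_left (fun w _ => pvLoop_top w)
  rw [hmap, pvZip_eq text.toList ' ']
  have := (pvMain text.toList.length text.toList ' ' (le_refl _) pv_space_not_alnum).1
  unfold PySem.Chars.join
  rw [this]
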